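-- pv_equiv track=rewrite | github.com/TeamWizardry/LibrarianLib | ConvertAssets.py | break_up_lang
-- ===== SOURCE A (Python) =====
-- def to_snake_case(string):
--     # type: (str) -> str
--     string = string.replace("-", "_")
--     if string.isupper():
--         return string.lower()
--     elif string.islower():
--         return string
--     split = list()
--     last_index = 0
--     last_token_upper = True
--     for i in range(len(string)):
--         if string[i].isupper():
--             if not last_token_upper:
--                 split.append(string[last_index:i].lower())
--                 last_index = i
--             last_token_upper = True
--         else:
--             last_token_upper = string[i] == "_"
--     split.append(string[last_index:].lower())
--     return "_".join(split)
--
-- def break_up_lang(string):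
--     # type: (str) -> str
--     if string.strip().startswith("#"):
--         return string
--     broken = string.split("=", 1)
--     if len(broken) != 2:
--         return string
--     lang_parts = broken[0].replace(":", ".:").split(".")
--     corrected = ""
--     for part in lang_parts:
--         snake = to_snake_case(part)
--         if part.startswith(":"):
--             corrected += snake
--         else:
--             corrected += "." + snake
--
--     return corrected[1:] + "=" + broken[1]
-- ===== SOURCE B (Python) =====
-- def to_snake_case(string):
--     # one-pass emitter: walk the chars once, inserting "_" before an uppercase
--     # letter whose predecessor is neither uppercase nor "_", lowering as we go
--     string = string.replace("-", "_")
--     if string.isupper():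
--         return string.lower()
--     out = []
--     prev = None
--     for c in string:
--         if c.isupper() and prev is not None and not prev.isupper() and prev != "_":
--             out.append("_")
--         out.append(c.lower())
--         prev = c
--     return "".join(out)
--
--
-- def break_up_lang(string):
--     if string.strip().startswith("#"):
--         return string
--     broken = string.split("=", 1)
--     if len(broken) != 2:
--         return string
--     parts = broken[0].replace(":", ".:").split(".")
--     pieces = [to_snake_case(p) if p.startswith(":") else "." + to_snake_case(p)
--               for p in parts]
--     return "".join(pieces)[1:] + "=" + broken[1]
-- ===== Notes on version B (the rewrite author's own statement) =====
-- stated objective: simpler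
-- what changed: to_snake_case's index/slice/split-list state machine (tracking last_index, slicing pieces out and joining them on underscores) is replaced by a single-pass character emitter that inserts an underscore before an uppercase letter whose predecessor is neither uppercase nor an underscore and lowers as it goes (dropping the islower shortcut), and break_up_lang rebuilds the key with a comprehension plus join instead of a string accumulator.
import Mathlib
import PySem

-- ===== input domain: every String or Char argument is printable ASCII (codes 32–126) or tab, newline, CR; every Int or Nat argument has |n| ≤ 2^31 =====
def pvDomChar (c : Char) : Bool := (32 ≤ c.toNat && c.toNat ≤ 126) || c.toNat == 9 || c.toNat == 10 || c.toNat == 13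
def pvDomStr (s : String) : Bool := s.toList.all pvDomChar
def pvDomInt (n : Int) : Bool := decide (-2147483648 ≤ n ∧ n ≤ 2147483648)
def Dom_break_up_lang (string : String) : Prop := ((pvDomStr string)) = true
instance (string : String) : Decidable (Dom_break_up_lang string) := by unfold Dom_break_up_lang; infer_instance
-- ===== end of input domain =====

-- B replaces A's index/slice/split-list snake_case state machine by a one-pass character
-- emitter (and a comprehension+join rebuild); same return value, stated for printable-ASCII input.


-- Python str.isupper() / str.islower() (string-level), hand-ported: exact on the printable-ASCII
-- domain, where the cased characters are exactly the letters A-Z/a-z. Shared by both ports.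
def pyStrIsupper (cs : List Char) : Bool :=
  cs.any PySem.Chars.isupper && cs.all (fun c => !PySem.Chars.islower c)
def pyStrIslower (cs : List Char) : Bool :=
  cs.any PySem.Chars.islower && cs.all (fun c => !PySem.Chars.isupper c)

-- ===== PORT A =====
-- body of A's `for i in range(len(string))` loop; state = (split, last_index, last_token_upper)
def tscAStep (cs : List Char) (st : List (List Char) × Nat × Bool) (i : Nat) :
    List (List Char) × Nat × Bool :=
  if PySem.Chars.isupper (cs.getD i ' ') then
    if !st.2.2 then
      (st.1 ++ [PySem.Chars.lower (PySem.List.slice cs (some (st.2.1 : Int)) (some (i : Int)))],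
       i, true)
    else (st.1, st.2.1, true)
  else (st.1, st.2.1, cs.getD i ' ' == '_')

def to_snake_case_A (s : List Char) : List Char :=
  let cs := PySem.Chars.replace s ['-'] ['_']
  if pyStrIsupper cs then PySem.Chars.lower cs
  else if pyStrIslower cs then cs
  else
    let st := (List.range cs.length).foldl (tscAStep cs) ([], 0, true)
    PySem.Chars.join ['_']
      (st.1 ++ [PySem.Chars.lower (PySem.List.slice cs (some (st.2.1 : Int)) none)])

def break_up_lang (string : String) : String :=
  let cs := string.toList
  if PySem.Chars.startswith (PySem.Chars.strip cs) ['#'] then string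
  else
    let broken := PySem.Chars.splitOnMax cs ['='] 1
    if broken.length ≠ 2 then string
    else
      let lang_parts :=
        PySem.Chars.splitOn (PySem.Chars.replace (broken.getD 0 []) [':'] ['.', ':']) ['.']
      let corrected := lang_parts.foldl (fun acc part =>
        if PySem.Chars.startswith part [':'] then acc ++ to_snake_case_A part
        else acc ++ '.' :: to_snake_case_A part) []
      String.ofList (PySem.List.slice corrected (some 1) none ++ '=' :: broken.getD 1 [])

-- ===== PORT B =====
-- body of B's `for c in string` loop; state = (out, prev)
def tscBStep (st : List Char × Option Char) (c : Char) : List Char × Option Char :=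
  ((st.1 ++
      (if PySem.Chars.isupper c &&
          (match st.2 with
           | none => false
           | some p => !PySem.Chars.isupper p && p != '_') then ['_'] else []))
     ++ [PySem.Chars.lowerChar c], some c)

def to_snake_case_B (s : List Char) : List Char :=
  let cs := PySem.Chars.replace s ['-'] ['_']
  if pyStrIsupper cs then PySem.Chars.lower cs
  else (cs.foldl tscBStep ([], none)).1

def break_up_lang_alt (string : String) : String :=
  let cs := string.toList
  if PySem.Chars.startswith (PySem.Chars.strip cs) ['#'] then string
  else
    let broken := PySem.Chars.splitOnMax cs ['='] 1
    if broken.length ≠ 2 then string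
    else
      let parts :=
        PySem.Chars.splitOn (PySem.Chars.replace (broken.getD 0 []) [':'] ['.', ':']) ['.']
      let pieces := parts.map (fun p =>
        if PySem.Chars.startswith p [':'] then to_snake_case_B p
        else '.' :: to_snake_case_B p)
      String.ofList (PySem.List.slice (PySem.Chars.join [] pieces) (some 1) none
                   ++ '=' :: broken.getD 1 [])

-- ===== PRECONDITION & SPEC =====
def Spec_break_up_lang (string : String) (out : String) : Prop := out = break_up_lang_alt string
instance (string : String) (out : String) : Decidable (Spec_break_up_lang string out) := by
  unfold Spec_break_up_lang; infer_instance

-- ===== CLAIM (what is proved, stated in full; the proofs are below) =====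
def Claim_equal_break_up_lang : Prop :=
  ∀ (string : String), Dom_break_up_lang string → Spec_break_up_lang string (break_up_lang string)

-- ===== LEMMAS AND PROOFS =====

theorem join_append_singleton (sep : List Char) (xs : List (List Char)) (hx : xs ≠ []) (y : List Char) :
    PySem.Chars.join sep (xs ++ [y]) = PySem.Chars.join sep xs ++ sep ++ y := by
  induction xs with
  | nil => exact absurd rfl hx
  | cons x xs ih =>
    cases xs with
    | nil =>
      rw [List.singleton_append, PySem.Chars.join_cons_cons sep x y [],
          PySem.Chars.join_singleton, PySem.Chars.join_singleton]
    | cons z zs =>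
      have h1 : (x :: z :: zs) ++ [y] = x :: z :: (zs ++ [y]) := by simp
      rw [h1, PySem.Chars.join_cons_cons sep x z (zs ++ [y]),
          PySem.Chars.join_cons_cons sep x z zs]
      have h2 : (z :: (zs ++ [y])) = (z :: zs) ++ [y] := by simp
      rw [h2, ih (by simp)]
      simp

theorem join_snoc_append (sep : List Char) (xs : List (List Char)) (y z : List Char) :
    PySem.Chars.join sep (xs ++ [y ++ z]) = PySem.Chars.join sep (xs ++ [y]) ++ z := by
  cases xs with
  | nil => simp [PySem.Chars.join_singleton]
  | cons x xs =>
    rw [join_append_singleton sep _ (by simp) (y ++ z),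
        join_append_singleton sep _ (by simp) y]
    simp

theorem join_nil_eq_flatten (l : List (List Char)) :
    PySem.Chars.join [] l = l.flatten := by
  induction l with
  | nil => exact PySem.Chars.join_nil []
  | cons x xs ih =>
    cases xs with
    | nil => simp [PySem.Chars.join_singleton]
    | cons z zs => rw [PySem.Chars.join_cons_cons, ih]; simp

-- B's one-pass loop is the identity (modulo append) on strings with no uppercase character
theorem bfold_no_upper (cs : List Char) (h : ∀ c ∈ cs, PySem.Chars.isupper c = false)
    (out : List Char) (p : Option Char) :
    (cs.foldl tscBStep (out, p)).1 = out ++ cs := by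
  induction cs generalizing out p with
  | nil => simp
  | cons c cs ih =>
    have hc : PySem.Chars.isupper c = false := h c (by simp)
    have hlow : PySem.Chars.lowerChar c = c := by simp [PySem.Chars.lowerChar, hc]
    have hstep : tscBStep (out, p) c = (out ++ [c], some c) := by
      simp [tscBStep, hc, hlow]
    rw [List.foldl_cons, hstep, ih (fun x hx => h x (by simp [hx]))]
    simp

-- invariant tying A's index/slice state machine to B's one-pass emitter, after i characters
theorem tsc_invariant (cs : List Char) (i : Nat) (hi : i ≤ cs.length) :
    let stA := (List.range i).foldl (tscAStep cs) ([], 0, true)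
    let stB := (cs.take i).foldl tscBStep ([], none)
    stA.2.1 ≤ i ∧
    stA.2.2 = (match stB.2 with
               | none => true
               | some p => PySem.Chars.isupper p || p == '_') ∧
    PySem.Chars.join ['_'] (stA.1 ++ [PySem.Chars.lower ((cs.drop stA.2.1).take (i - stA.2.1))])
      = stB.1 := by
  induction i with
  | zero => simp [PySem.Chars.join_singleton, PySem.Chars.lower]
  | succ i ih =>
    have hi' : i < cs.length := Nat.lt_of_succ_le hi
    obtain ⟨h1, h2, h3⟩ := ih (Nat.le_of_lt hi')
    set stA := (List.range i).foldl (tscAStep cs) ([], 0, true) with hA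
    set stB := (cs.take i).foldl tscBStep ([], none) with hB
    have hgetD : cs[i]? = some cs[i] := List.getElem?_eq_getElem hi'
    -- extension of the current slice by one character
    have hslice : ∀ j, j ≤ i → (cs.drop j).take (i + 1 - j) = (cs.drop j).take (i - j) ++ [cs[i]] := by
      intro j hj
      have hlen : i - j < (cs.drop j).length := by simp [List.length_drop]; omega
      have he : i + 1 - j = (i - j) + 1 := by omega
      rw [he, List.take_add_one, List.getElem?_eq_getElem hlen]
      simp [List.getElem_drop, Nat.add_sub_cancel' hj]
    have hlowapp : ∀ (u : List Char) (c : Char),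
        PySem.Chars.lower (u ++ [c]) = PySem.Chars.lower u ++ [PySem.Chars.lowerChar c] := by
      intro u c; simp [PySem.Chars.lower]
    have hfoldA : (List.range (i+1)).foldl (tscAStep cs) ([], 0, true) = tscAStep cs stA i := by
      rw [List.range_succ, List.foldl_append]; rfl
    have hfoldB : (cs.take (i+1)).foldl tscBStep ([], none) = tscBStep stB cs[i] := by
      have htake1 : cs.take (i+1) = cs.take i ++ [cs[i]] := by
        rw [List.take_add_one, List.getElem?_eq_getElem hi']; rfl
      rw [hB, htake1, List.foldl_append, List.foldl_cons, List.foldl_nil]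
    rw [hfoldA, hfoldB]
    by_cases hup : PySem.Chars.isupper cs[i] = true
    · by_cases hltu : stA.2.2 = true
      · -- uppercase after upper/underscore: A keeps state; B emits without boundary
        have hBins : (match stB.2 with
            | none => false
            | some p => !PySem.Chars.isupper p && p != '_') = false := by
          rcases hstB2 : stB.2 with _ | p
          · rfl
          · rw [hstB2, hltu] at h2
            dsimp only at h2 ⊢
            cases hP : PySem.Chars.isupper p
            · rw [hP] at h2; simp at h2; simp [h2]
            · simp
        have hstepA : tscAStep cs stA i = (stA.1, stA.2.1, true) := by
          simp [tscAStep, hgetD, hup, hltu]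
        have hstepB : tscBStep stB cs[i] = (stB.1 ++ [PySem.Chars.lowerChar cs[i]], some cs[i]) := by
          simp [tscBStep, hBins]
        rw [hstepA, hstepB]
        refine ⟨by dsimp only; omega, by simp [hup], ?_⟩
        dsimp only
        rw [hslice _ h1, hlowapp, join_snoc_append, h3]
      · -- boundary: A closes a piece, B inserts '_'
        have hltu' : stA.2.2 = false := by simpa using hltu
        have hBins : (match stB.2 with
            | none => false
            | some p => !PySem.Chars.isupper p && p != '_') = true := by
          rcases hstB2 : stB.2 with _ | p
          · rw [hstB2, hltu'] at h2; dsimp only at h2; simp at h2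
          · rw [hstB2, hltu'] at h2
            dsimp only at h2 ⊢
            cases hP : PySem.Chars.isupper p
            · rw [hP] at h2; simp at h2; simp [h2]
            · rw [hP] at h2; simp at h2
        have hstepA : tscAStep cs stA i
            = (stA.1 ++ [PySem.Chars.lower (PySem.List.slice cs (some (stA.2.1 : Int)) (some (i : Int)))],
               i, true) := by
          simp [tscAStep, hgetD, hup, hltu']
        have hstepB : tscBStep stB cs[i]
            = (stB.1 ++ ['_'] ++ [PySem.Chars.lowerChar cs[i]], some cs[i]) := by
          simp [tscBStep, hup, hBins]
        rw [hstepA, hstepB]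
        refine ⟨by dsimp only; omega, by simp [hup], ?_⟩
        dsimp only
        have hone : (cs.drop i).take (i + 1 - i) = [cs[i]] := by
          have h0 : (cs.drop i).take (i - i) = [] := by simp
          have := hslice i (le_refl i)
          rw [h0] at this; simpa using this
        rw [PySem.List.slice_natCast cs stA.2.1 i, hone,
            show PySem.Chars.lower [cs[i]] = [PySem.Chars.lowerChar cs[i]] from by
              simp [PySem.Chars.lower],
            join_append_singleton _ _ (by simp) _, h3]
    · -- not uppercase: A keeps split/last_index, records token state; B emits lowered char
      have hup' : PySem.Chars.isupper cs[i] = false := by simpa using hup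
      have hstepA : tscAStep cs stA i = (stA.1, stA.2.1, cs[i] == '_') := by
        simp [tscAStep, hgetD, hup']
      have hstepB : tscBStep stB cs[i] = (stB.1 ++ [PySem.Chars.lowerChar cs[i]], some cs[i]) := by
        simp [tscBStep, hup']
      rw [hstepA, hstepB]
      refine ⟨by dsimp only; omega, by simp [hup'], ?_⟩
      dsimp only
      rw [hslice _ h1, hlowapp, join_snoc_append, h3]

theorem to_snake_case_eq (s : List Char) : to_snake_case_A s = to_snake_case_B s := by
  unfold to_snake_case_A to_snake_case_B
  set cs := PySem.Chars.replace s ['-'] ['_'] with hcs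
  by_cases hU : pyStrIsupper cs = true
  · simp [hU]
  · simp only [hU, Bool.false_eq_true]
    by_cases hL : pyStrIslower cs = true
    · -- A's islower shortcut: B's loop is the identity on an uppercase-free string
      have hnoup : ∀ c ∈ cs, PySem.Chars.isupper c = false := by
        intro c hc
        have h := hL
        simp [pyStrIslower] at h
        exact h.2 c hc
      rw [bfold_no_upper cs hnoup [] none]
      simp [hL]
    · simp only [hL, Bool.false_eq_true]
      obtain ⟨h1, _, h3⟩ := tsc_invariant cs cs.length (le_refl _)
      set stA := (List.range cs.length).foldl (tscAStep cs) ([], 0, true) with hA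
      rw [List.take_length] at h3
      have hsl : PySem.List.slice cs (some (stA.2.1 : Int)) none = cs.drop stA.2.1 := by
        rw [PySem.List.slice_from cs (by positivity)]; simp
      have hfull : (cs.drop stA.2.1).take (cs.length - stA.2.1) = cs.drop stA.2.1 := by
        apply List.take_of_length_le; simp [List.length_drop]
      rw [hsl, ← hfull, h3]
      simp

theorem break_up_lang_fold_eq (parts : List (List Char)) :
    parts.foldl (fun acc part =>
        if PySem.Chars.startswith part [':'] then acc ++ to_snake_case_A part
        else acc ++ '.' :: to_snake_case_A part) []
      = PySem.Chars.join [] (parts.map (fun p =>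
          if PySem.Chars.startswith p [':'] then to_snake_case_B p
          else '.' :: to_snake_case_B p)) := by
  have hstep : (fun (acc : List Char) part =>
      if PySem.Chars.startswith part [':'] then acc ++ to_snake_case_A part
      else acc ++ '.' :: to_snake_case_A part)
      = (fun acc part => acc ++ (if PySem.Chars.startswith part [':'] then to_snake_case_B part
          else '.' :: to_snake_case_B part)) := by
    funext acc part
    rw [to_snake_case_eq part]
    split <;> rfl
  rw [hstep, PySem.List.foldl_append_eq_flatMap, join_nil_eq_flatten, List.flatMap_def]
  simp

-- ===== VERDICT (by name: the statement is the Claim_ definition above) =====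
theorem break_up_lang_spec : Claim_equal_break_up_lang := by
  intro string _
  unfold Spec_break_up_lang break_up_lang break_up_lang_alt
  simp only []
  split
  · rfl
  · split
    · rfl
    · rw [break_up_lang_fold_eq]
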